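-- pv_equiv track=rewrite | github.com/NVIDIA/omniperf | skill-test-results/run_phase4_thorough.py | status_from_checks
-- ===== SOURCE A (Python) =====
-- def status_from_checks(checks):
--     vals = [c.get('status') for c in checks]
--     if any(v == 'fail' for v in vals): return 'fail'
--     if any(v == 'blocked_missing_prereq' for v in vals): return 'blocked_missing_prereq'
--     if any(v == 'blocked_needs_approval' for v in vals): return 'blocked_needs_approval'
--     if any(v == 'warning' for v in vals): return 'warning'
--     if any(v == 'pass_with_warnings' for v in vals): return 'pass_with_warnings'
--     return 'pass'
-- ===== SOURCE B (Python) =====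
-- _ORDER = ('fail', 'blocked_missing_prereq', 'blocked_needs_approval', 'warning', 'pass_with_warnings')
-- _RANK = {s: i for i, s in enumerate(_ORDER)}
--
-- def status_from_checks(checks):
--     best = 5
--     for c in checks:
--         r = _RANK.get(c.get('status'), 5)
--         if r < best:
--             best = r
--     return _ORDER[best] if best < 5 else 'pass'
-- ===== Notes on version B (the rewrite author's own statement) =====
-- stated objective: simpler
-- what changed: Replaces five separate any-scans over the status list by a single pass that keeps the minimum priority rank looked up in a table, then maps the minimum rank back to its status name.
import Mathlib
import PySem

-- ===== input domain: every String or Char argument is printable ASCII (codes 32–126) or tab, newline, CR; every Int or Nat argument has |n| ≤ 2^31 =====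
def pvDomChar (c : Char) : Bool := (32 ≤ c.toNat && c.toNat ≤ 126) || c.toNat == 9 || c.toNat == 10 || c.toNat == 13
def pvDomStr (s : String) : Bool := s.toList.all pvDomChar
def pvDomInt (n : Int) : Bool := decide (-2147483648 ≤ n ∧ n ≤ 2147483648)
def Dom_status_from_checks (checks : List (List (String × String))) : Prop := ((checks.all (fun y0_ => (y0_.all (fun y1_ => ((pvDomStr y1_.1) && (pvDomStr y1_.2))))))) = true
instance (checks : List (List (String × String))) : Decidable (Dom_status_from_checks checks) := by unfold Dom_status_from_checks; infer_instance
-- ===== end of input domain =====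

-- B replaces A's five any-scans by one min-rank pass over a priority table (objective: simpler).

-- ===== PORT A =====
def status_from_checks (checks : List (List (String × String))) : String :=
  let vals := checks.map (fun c => (PySem.Dict.mk c).get? "status")
  if vals.any (fun v => v == some "fail") then "fail"
  else if vals.any (fun v => v == some "blocked_missing_prereq") then "blocked_missing_prereq"
  else if vals.any (fun v => v == some "blocked_needs_approval") then "blocked_needs_approval"
  else if vals.any (fun v => v == some "warning") then "warning"
  else if vals.any (fun v => v == some "pass_with_warnings") then "pass_with_warnings"
  else "pass"

-- ===== PORT B =====
-- _ORDER tuple and _RANK dict from Source B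
def pvOrder : List String := ["fail", "blocked_missing_prereq", "blocked_needs_approval", "warning", "pass_with_warnings"]
def pvRankDict : PySem.Dict String Nat :=
  PySem.Dict.mk [("fail", 0), ("blocked_missing_prereq", 1), ("blocked_needs_approval", 2), ("warning", 3), ("pass_with_warnings", 4)]
-- _RANK.get(v, 5) where v : Option String (None is never a key of _RANK)
def pvRank (v : Option String) : Nat :=
  match v with
  | none => 5
  | some s => (pvRankDict.get? s).getD 5

def status_from_checks_alt (checks : List (List (String × String))) : String :=
  let best := checks.foldl (fun b c => min b (pvRank ((PySem.Dict.mk c).get? "status"))) 5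
  if best < 5 then (PySem.List.pyGet? pvOrder (Int.ofNat best)).getD "pass" else "pass"

-- ===== PRECONDITION & SPEC =====
def Spec_status_from_checks (checks : List (List (String × String))) (out : String) : Prop := out = status_from_checks_alt checks
instance (checks : List (List (String × String))) (out : String) : Decidable (Spec_status_from_checks checks out) := by unfold Spec_status_from_checks; infer_instance

-- ===== CLAIM (what is proved, stated in full; the proofs are below) =====
def Claim_equal_status_from_checks : Prop := ∀ (checks : List (List (String × String))), Dom_status_from_checks checks → Spec_status_from_checks checks (status_from_checks checks)

-- ===== LEMMAS AND PROOFS =====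

theorem pvFold_le_init {α : Type} (f : α → Nat) (l : List α) (a : Nat) :
    l.foldl (fun b x => min b (f x)) a ≤ a := by
  induction l generalizing a with
  | nil => simp
  | cons h t ih => exact le_trans (ih (min a (f h))) (min_le_left _ _)

theorem pvFold_le_mem {α : Type} (f : α → Nat) (l : List α) (a : Nat)
    (c : α) (hc : c ∈ l) : l.foldl (fun b x => min b (f x)) a ≤ f c := by
  induction l generalizing a with
  | nil => simp at hc
  | cons h t ih =>
    rcases List.mem_cons.mp hc with hc | hc
    · subst hc
      exact le_trans (pvFold_le_init f t _) (min_le_right _ _)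
    · exact ih _ hc

theorem pvFold_ge {α : Type} (f : α → Nat) (l : List α) (a : Nat) (k : Nat)
    (ha : k ≤ a) (hl : ∀ x ∈ l, k ≤ f x) : k ≤ l.foldl (fun b x => min b (f x)) a := by
  induction l generalizing a with
  | nil => simpa
  | cons h t ih =>
    exact ih _ (le_min ha (hl h (by simp))) (fun x hx => hl x (List.mem_cons_of_mem _ hx))

theorem pvFold_eq {α : Type} (f : α → Nat) (l : List α) (k : Nat) (hk : k ≤ 5)
    (c : α) (hc : c ∈ l) (hfc : f c = k) (hl : ∀ x ∈ l, k ≤ f x) :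
    l.foldl (fun b x => min b (f x)) 5 = k :=
  le_antisymm (hfc ▸ pvFold_le_mem f l 5 c hc) (pvFold_ge f l 5 k hk hl)

theorem pvRank_eq (v : Option String) :
    pvRank v = if v = some "fail" then 0
      else if v = some "blocked_missing_prereq" then 1
      else if v = some "blocked_needs_approval" then 2
      else if v = some "warning" then 3
      else if v = some "pass_with_warnings" then 4
      else 5 := by
  rcases v with _ | s
  · simp [pvRank]
  · simp only [pvRank, pvRankDict, Option.some.injEq]
    rw [PySem.Dict.get?_mk_cons, PySem.Dict.get?_mk_cons, PySem.Dict.get?_mk_cons,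
      PySem.Dict.get?_mk_cons, PySem.Dict.get?_mk_cons]
    simp only [beq_iff_eq]
    by_cases h1 : s = "fail"
    · subst h1; simp
    · rw [if_neg (fun h => h1 h.symm), if_neg h1]
      by_cases h2 : s = "blocked_missing_prereq"
      · subst h2; simp
      · rw [if_neg (fun h => h2 h.symm), if_neg h2]
        by_cases h3 : s = "blocked_needs_approval"
        · subst h3; simp
        · rw [if_neg (fun h => h3 h.symm), if_neg h3]
          by_cases h4 : s = "warning"
          · subst h4; simp
          · rw [if_neg (fun h => h4 h.symm), if_neg h4]
            by_cases h5 : s = "pass_with_warnings"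
            · subst h5; simp
            · rw [if_neg (fun h => h5 h.symm), if_neg h5]
              simp [PySem.Dict.get?]

theorem pvAlt_of_fold (checks : List (List (String × String))) (n : Nat)
    (h : checks.foldl (fun b c => min b (pvRank ((PySem.Dict.mk c).get? "status"))) 5 = n) :
    status_from_checks_alt checks =
      (if n < 5 then (PySem.List.pyGet? pvOrder (Int.ofNat n)).getD "pass" else "pass") := by
  unfold status_from_checks_alt
  rw [h]

theorem status_from_checks_spec_aux (checks : List (List (String × String))) :
    status_from_checks checks = status_from_checks_alt checks := by
  have gd : ∀ (s : String), ((checks.map (fun c => (PySem.Dict.mk c).get? "status")).any (fun v => v == some s)) = true ↔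
      ∃ c ∈ checks, (PySem.Dict.mk c).get? "status" = some s := by
    intro s
    simp [List.any_map, List.any_eq_true]
  unfold status_from_checks
  by_cases h0 : ∃ c ∈ checks, (PySem.Dict.mk c).get? "status" = some "fail"
  · obtain ⟨c, hc, hcv⟩ := h0
    rw [if_pos ((gd "fail").mpr ⟨c, hc, hcv⟩),
      pvAlt_of_fold checks 0 (pvFold_eq _ _ 0 (by omega) c hc (by rw [pvRank_eq, hcv]; simp) (by omega))]
    decide
  · rw [if_neg (by rw [gd]; exact h0)]
    simp only [not_exists, not_and] at h0
    by_cases h1 : ∃ c ∈ checks, (PySem.Dict.mk c).get? "status" = some "blocked_missing_prereq"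
    · obtain ⟨c, hc, hcv⟩ := h1
      have hall : ∀ x ∈ checks, 1 ≤ pvRank ((PySem.Dict.mk x).get? "status") := by
        intro x hx
        rw [pvRank_eq]
        split_ifs with g1 g2 g3 g4 g5 <;> first | (exact absurd g1 (h0 x hx)) | omega
      rw [if_pos ((gd _).mpr ⟨c, hc, hcv⟩),
        pvAlt_of_fold checks 1 (pvFold_eq _ _ 1 (by omega) c hc (by rw [pvRank_eq, hcv]; simp) hall)]
      decide
    · rw [if_neg (by rw [gd]; exact h1)]
      simp only [not_exists, not_and] at h1
      by_cases h2 : ∃ c ∈ checks, (PySem.Dict.mk c).get? "status" = some "blocked_needs_approval"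
      · obtain ⟨c, hc, hcv⟩ := h2
        have hall : ∀ x ∈ checks, 2 ≤ pvRank ((PySem.Dict.mk x).get? "status") := by
          intro x hx
          rw [pvRank_eq]
          split_ifs with g1 g2 g3 g4 g5 <;>
            first | (exact absurd g1 (h0 x hx)) | (exact absurd g2 (h1 x hx)) | omega
        rw [if_pos ((gd _).mpr ⟨c, hc, hcv⟩),
          pvAlt_of_fold checks 2 (pvFold_eq _ _ 2 (by omega) c hc (by rw [pvRank_eq, hcv]; simp) hall)]
        decide
      · rw [if_neg (by rw [gd]; exact h2)]
        simp only [not_exists, not_and] at h2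
        by_cases h3 : ∃ c ∈ checks, (PySem.Dict.mk c).get? "status" = some "warning"
        · obtain ⟨c, hc, hcv⟩ := h3
          have hall : ∀ x ∈ checks, 3 ≤ pvRank ((PySem.Dict.mk x).get? "status") := by
            intro x hx
            rw [pvRank_eq]
            split_ifs with g1 g2 g3 g4 g5 <;>
              first | (exact absurd g1 (h0 x hx)) | (exact absurd g2 (h1 x hx)) |
                (exact absurd g3 (h2 x hx)) | omega
          rw [if_pos ((gd _).mpr ⟨c, hc, hcv⟩),
            pvAlt_of_fold checks 3 (pvFold_eq _ _ 3 (by omega) c hc (by rw [pvRank_eq, hcv]; simp) hall)]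
          decide
        · rw [if_neg (by rw [gd]; exact h3)]
          simp only [not_exists, not_and] at h3
          by_cases h4 : ∃ c ∈ checks, (PySem.Dict.mk c).get? "status" = some "pass_with_warnings"
          · obtain ⟨c, hc, hcv⟩ := h4
            have hall : ∀ x ∈ checks, 4 ≤ pvRank ((PySem.Dict.mk x).get? "status") := by
              intro x hx
              rw [pvRank_eq]
              split_ifs with g1 g2 g3 g4 g5 <;>
                first | (exact absurd g1 (h0 x hx)) | (exact absurd g2 (h1 x hx)) |
                  (exact absurd g3 (h2 x hx)) | (exact absurd g4 (h3 x hx)) | omega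
            rw [if_pos ((gd _).mpr ⟨c, hc, hcv⟩),
              pvAlt_of_fold checks 4 (pvFold_eq _ _ 4 (by omega) c hc (by rw [pvRank_eq, hcv]; simp) hall)]
            decide
          · rw [if_neg (by rw [gd]; exact h4)]
            simp only [not_exists, not_and] at h4
            have hall : ∀ x ∈ checks, 5 ≤ pvRank ((PySem.Dict.mk x).get? "status") := by
              intro x hx
              rw [pvRank_eq]
              split_ifs with g1 g2 g3 g4 g5 <;>
                first | (exact absurd g1 (h0 x hx)) | (exact absurd g2 (h1 x hx)) |
                  (exact absurd g3 (h2 x hx)) | (exact absurd g4 (h3 x hx)) |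
                  (exact absurd g5 (h4 x hx)) | omega
            rw [pvAlt_of_fold checks 5
              (le_antisymm (pvFold_le_init _ checks 5) (pvFold_ge _ checks 5 5 (by omega) hall))]
            decide

-- ===== VERDICT (by name: the statement is the Claim_ definition above) =====
theorem status_from_checks_spec : Claim_equal_status_from_checks := by
  intro checks _
  exact status_from_checks_spec_aux checks
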